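-- pv_equiv track=rewrite | github.com/AatirNadim/data-mining-college | program5/temp.py | merge_func
-- ===== SOURCE A (Python) =====
-- def merge_func(s1 : str, s2 : str) :
--   res = ''
--   for itr in s1 :
--     if itr not in res :
--       res = res + itr
--   for itr in s2 :
--     if itr not in res :
--       res = res + itr
--   return res
-- ===== SOURCE B (Python) =====
-- def merge_func(s1 : str, s2 : str):
--     # Head-removal recursion: take the first char of the concatenation, delete
--     # every later occurrence of it, and recurse on the shortened remainder.
--     def dedup(t):
--         if not t:
--             return ''
--         return t[0] + dedup(t[1:].replace(t[0], ''))
--     return dedup(s1 + s2)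
-- ===== Notes on version B (the rewrite author's own statement) =====
-- stated objective: alternative
-- what changed: Replaces A's two accumulator loops that test membership in the growing result with a recursive head-removal dedup of s1+s2: keep the first character, delete all its later occurrences from the remainder, recurse.
import Mathlib
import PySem

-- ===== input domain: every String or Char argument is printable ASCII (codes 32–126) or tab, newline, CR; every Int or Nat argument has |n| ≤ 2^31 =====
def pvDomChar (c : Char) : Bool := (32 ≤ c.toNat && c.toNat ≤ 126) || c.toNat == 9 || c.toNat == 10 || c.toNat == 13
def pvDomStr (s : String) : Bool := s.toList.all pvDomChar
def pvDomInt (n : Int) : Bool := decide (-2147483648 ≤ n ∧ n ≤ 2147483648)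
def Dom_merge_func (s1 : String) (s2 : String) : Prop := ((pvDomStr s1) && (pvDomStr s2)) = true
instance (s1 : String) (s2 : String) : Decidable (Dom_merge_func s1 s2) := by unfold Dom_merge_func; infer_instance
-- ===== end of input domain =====

-- B replaces A's two accumulator loops (membership test in the growing result) with a
-- recursive head-removal dedup of s1+s2: keep the head, drop its later occurrences, recurse.


-- ===== PORT A =====
-- one iteration of A's loop body: 'if itr not in res: res = res + itr'
def mergeStepA (res : List Char) (itr : Char) : List Char :=
  if res.contains itr then res else res ++ [itr]

def merge_func (s1 : String) (s2 : String) : String :=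
  String.ofList (s2.toList.foldl mergeStepA (s1.toList.foldl mergeStepA []))

-- ===== PORT B =====
-- dedup(t) = '' if t empty else t[0] + dedup(t[1:].replace(t[0], ''))
def dedupRec : List Char → List Char
  | [] => []
  | c :: rest => c :: dedupRec (rest.filter (fun x => x ≠ c))
termination_by t => t.length
decreasing_by
  simp
  exact le_trans (List.length_filter_le _ _) (by simp)

def merge_func_alt (s1 : String) (s2 : String) : String :=
  String.ofList (dedupRec (s1.toList ++ s2.toList))

-- ===== PRECONDITION & SPEC =====
def Spec_merge_func (s1 : String) (s2 : String) (out : String) : Prop := out = merge_func_alt s1 s2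
instance (s1 : String) (s2 : String) (out : String) : Decidable (Spec_merge_func s1 s2 out) := by unfold Spec_merge_func; infer_instance

-- ===== CLAIM =====
def Claim_equal_merge_func : Prop := ∀ (s1 : String) (s2 : String), Dom_merge_func s1 s2 → Spec_merge_func s1 s2 (merge_func s1 s2)

-- ===== LEMMAS AND PROOFS =====
theorem mergeStepA_eq_add : mergeStepA = PySem.Set.add (α := Char) := by
  funext res c
  simp [mergeStepA, PySem.Set.add]

-- folding over the elements equal to a value already in the accumulator is a no-op
theorem foldl_add_filter (l : List Char) :
    ∀ (acc : List Char) (c : Char), c ∈ acc →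
      List.foldl PySem.Set.add acc l =
      List.foldl PySem.Set.add acc (l.filter (fun x => x ≠ c)) := by
  induction l with
  | nil => intro acc c _; rfl
  | cons x l ih =>
    intro acc c hc
    by_cases hx : x = c
    · subst hx
      simp only [List.filter_cons, decide_not]
      have hadd : PySem.Set.add acc x = acc := by
        simp [PySem.Set.add, hc]
      simp only [List.foldl_cons, hadd]
      simpa using ih acc x hc
    · simp only [List.filter_cons, ne_eq, hx, decide_not, List.foldl_cons]
      have hmem : c ∈ PySem.Set.add acc x := by
        simp [PySem.Set.add]; split <;> simp [hc]
      simpa [hx] using ih (PySem.Set.add acc x) c hmem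
  
-- a head not occurring in the list stays at the front of the fold
theorem foldl_add_cons_out (l : List Char) :
    ∀ (acc : List Char) (c : Char), c ∉ l →
      List.foldl PySem.Set.add (c :: acc) l = c :: List.foldl PySem.Set.add acc l := by
  induction l with
  | nil => intro acc c _; rfl
  | cons x l ih =>
    intro acc c hc
    have hx : x ≠ c := fun h => hc (by simp [h])
    have hstep : PySem.Set.add (c :: acc) x = c :: PySem.Set.add acc x := by
      simp [PySem.Set.add, hx]
      split <;> simp_all
    simp only [List.foldl_cons, hstep]
    exact ih (PySem.Set.add acc x) c (fun h => hc (List.mem_cons_of_mem _ h))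

theorem dedupRec_eq_ofList (t : List Char) : dedupRec t = PySem.Set.ofList t := by
  generalize hn : t.length = n
  induction n using Nat.strong_induction_on generalizing t with
  | _ n ih =>
    cases t with
    | nil => exact dedupRec.eq_1
    | cons c rest =>
      subst hn
      rw [dedupRec.eq_2,
        ih (rest.filter (fun x => x ≠ c)).length
          (by simpa using Nat.lt_succ_of_le (List.length_filter_le _ _)) _ rfl,
        PySem.Set.ofList_eq_foldl, PySem.Set.ofList_eq_foldl]
      have h1 : List.foldl PySem.Set.add [] (c :: rest) =
          List.foldl PySem.Set.add [c] rest := by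
        simp [PySem.Set.add]
      rw [h1, foldl_add_filter rest [c] c (by simp)]
      have hnm : c ∉ rest.filter (fun x => x ≠ c) := by simp
      simpa using (foldl_add_cons_out (rest.filter (fun x => x ≠ c)) [] c hnm).symm

-- ===== VERDICT =====
theorem merge_func_spec : Claim_equal_merge_func := by
  intro s1 s2 _
  unfold Spec_merge_func merge_func merge_func_alt
  rw [dedupRec_eq_ofList, PySem.Set.ofList_eq_foldl, List.foldl_append, mergeStepA_eq_add]
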